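-- pv_equiv track=rewrite | github.com/BissuelD/Frog | Frog/universe_manager.py | recurcive_pbc_movement_constructor
-- ===== SOURCE A (Python) =====
-- def recurcive_pbc_movement_constructor(movement_to_try, L_movement):
--     movement_todo = movement_to_try.pop()
--     L_movement_new = []
--     for movement in L_movement:
--         L_movement_new.append(movement)
--         L_movement_new.append(movement + movement_todo)
--         L_movement_new.append(movement - movement_todo)
--
--     if len(movement_to_try) > 0:
--         L_movement_new = recurcive_pbc_movement_constructor(movement_to_try, L_movement_new)
--
--     return(L_movement_new)
-- ===== SOURCE B (Python) =====
-- def recurcive_pbc_movement_constructor(movement_to_try, L_movement):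
--     result = L_movement
--     while movement_to_try:
--         todo = movement_to_try.pop()
--         result = [v for m in result for v in (m, m + todo, m - todo)]
--     return result
-- ===== Notes on version B (the rewrite author's own statement) =====
-- stated objective: simpler
-- what changed: The recursion is replaced by a flat while-loop that pops each offset and rebuilds the result with one comprehension per offset; no recursive calls, no per-element triple append.
-- crash fix: On an empty movement_to_try A raises IndexError (pop from empty list) while B returns L_movement unchanged. — e.g. on recurcive_pbc_movement_constructor([], [1]): A raises IndexError, B returns [1]
import Mathlib
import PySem

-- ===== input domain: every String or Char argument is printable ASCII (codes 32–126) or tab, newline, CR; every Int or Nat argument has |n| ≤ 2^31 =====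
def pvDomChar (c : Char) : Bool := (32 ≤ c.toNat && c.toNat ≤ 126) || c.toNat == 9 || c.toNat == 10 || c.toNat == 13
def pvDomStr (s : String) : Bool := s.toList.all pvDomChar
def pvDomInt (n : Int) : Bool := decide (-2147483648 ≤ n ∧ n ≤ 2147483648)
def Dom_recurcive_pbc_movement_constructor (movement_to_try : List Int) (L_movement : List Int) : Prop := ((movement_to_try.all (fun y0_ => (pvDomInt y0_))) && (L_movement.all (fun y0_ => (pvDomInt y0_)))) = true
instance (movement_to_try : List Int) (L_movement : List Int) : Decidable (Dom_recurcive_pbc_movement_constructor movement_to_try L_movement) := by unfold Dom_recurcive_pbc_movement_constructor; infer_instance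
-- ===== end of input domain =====

-- B replaces the recursion by a flat pop-and-rebuild loop (one comprehension per offset);
-- both A and B mutate movement_to_try in Python (pop it empty) — the claim is about the return value.
-- ===== PORT A =====
-- A pops the LAST element (movement_to_try.pop()); on [] Python raises IndexError (excluded by Pre_).
def recurcive_pbc_movement_constructor (movement_to_try : List Int) (L_movement : List Int) : List Int :=
  match h : movement_to_try.getLast? with
  | none => L_movement   -- Python raises IndexError here; excluded by Pre_
  | some movement_todo =>
    let rest := movement_to_try.dropLast
    let L_movement_new :=
      L_movement.foldl (fun acc movement =>
        ((acc ++ [movement]) ++ [movement + movement_todo]) ++ [movement - movement_todo]) []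
    if rest.length > 0 then recurcive_pbc_movement_constructor rest L_movement_new
    else L_movement_new
termination_by movement_to_try.length
decreasing_by
  simp [List.length_dropLast]
  cases movement_to_try with
  | nil => simp [List.getLast?] at h
  | cons a t => simp

-- ===== PORT B =====
-- while movement_to_try: pop last; rebuild = fold over the reversed list
def recurcive_pbc_movement_constructor_alt (movement_to_try : List Int) (L_movement : List Int) : List Int :=
  movement_to_try.reverse.foldl
    (fun result todo => result.flatMap (fun m => [m, m + todo, m - todo])) L_movement

-- ===== PRECONDITION & SPEC =====
-- Pre_ excludes only the empty movement_to_try, on which Python A raises IndexError.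
def Pre_recurcive_pbc_movement_constructor (movement_to_try : List Int) (L_movement : List Int) : Prop :=
  movement_to_try ≠ []
instance (movement_to_try : List Int) (L_movement : List Int) : Decidable (Pre_recurcive_pbc_movement_constructor movement_to_try L_movement) := by unfold Pre_recurcive_pbc_movement_constructor; infer_instance
def pvWitness_recurcive_pbc_movement_constructor : List Int × List Int := ([1, 2], [0, 5])

-- On an empty movement_to_try A raises IndexError (pop from empty list) while B returns L_movement unchanged.
def Raises_recurcive_pbc_movement_constructor (movement_to_try : List Int) (L_movement : List Int) : Prop :=
  movement_to_try = []
instance (movement_to_try : List Int) (L_movement : List Int) : Decidable (Raises_recurcive_pbc_movement_constructor movement_to_try L_movement) := by unfold Raises_recurcive_pbc_movement_constructor; infer_instance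
def pvRaiseWitness_recurcive_pbc_movement_constructor : List Int × List Int := ([], [1])
def pvRaiseWitnessOut_recurcive_pbc_movement_constructor : List Int := [1]

def Spec_recurcive_pbc_movement_constructor (movement_to_try : List Int) (L_movement : List Int) (out : List Int) : Prop := out = recurcive_pbc_movement_constructor_alt movement_to_try L_movement
instance (movement_to_try : List Int) (L_movement : List Int) (out : List Int) : Decidable (Spec_recurcive_pbc_movement_constructor movement_to_try L_movement out) := by unfold Spec_recurcive_pbc_movement_constructor; infer_instance

-- ===== CLAIM (what is proved, stated in full; the proofs are below) =====
def Claim_equal_recurcive_pbc_movement_constructor : Prop := ∀ (movement_to_try : List Int) (L_movement : List Int), Dom_recurcive_pbc_movement_constructor movement_to_try L_movement → Pre_recurcive_pbc_movement_constructor movement_to_try L_movement → Spec_recurcive_pbc_movement_constructor movement_to_try L_movement (recurcive_pbc_movement_constructor movement_to_try L_movement)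
def Claim_raises_recurcive_pbc_movement_constructor : Prop := (∀ (movement_to_try : List Int) (L_movement : List Int), Dom_recurcive_pbc_movement_constructor movement_to_try L_movement → Raises_recurcive_pbc_movement_constructor movement_to_try L_movement → ¬ Pre_recurcive_pbc_movement_constructor movement_to_try L_movement) ∧ (Dom_recurcive_pbc_movement_constructor (pvRaiseWitness_recurcive_pbc_movement_constructor.1) (pvRaiseWitness_recurcive_pbc_movement_constructor.2) ∧ Raises_recurcive_pbc_movement_constructor (pvRaiseWitness_recurcive_pbc_movement_constructor.1) (pvRaiseWitness_recurcive_pbc_movement_constructor.2) ∧ recurcive_pbc_movement_constructor_alt (pvRaiseWitness_recurcive_pbc_movement_constructor.1) (pvRaiseWitness_recurcive_pbc_movement_constructor.2) = pvRaiseWitnessOut_recurcive_pbc_movement_constructor)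

-- ===== LEMMAS AND PROOFS =====
-- A's append-triples loop builds exactly B's one-offset expansion.
theorem pv_expand_eq (L : List Int) (t : Int) (acc : List Int) :
    L.foldl (fun acc movement =>
        ((acc ++ [movement]) ++ [movement + t]) ++ [movement - t]) acc
      = acc ++ L.flatMap (fun m => [m, m + t, m - t]) := by
  induction L generalizing acc with
  | nil => simp
  | cons a l ih => simp [List.foldl, ih, List.flatMap]

theorem pv_main (movement_to_try L_movement : List Int) (h : movement_to_try ≠ []) :
    recurcive_pbc_movement_constructor movement_to_try L_movement
      = recurcive_pbc_movement_constructor_alt movement_to_try L_movement := by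
  induction movement_to_try using List.reverseRecOn generalizing L_movement with
  | nil => exact absurd rfl h
  | append_singleton ys t ih =>
    rw [recurcive_pbc_movement_constructor]
    split
    case h_1 hnone => simp at hnone
    case h_2 td htd =>
    have ht : td = t := by symm; simpa using htd
    subst ht
    simp only [List.dropLast_concat]
    rw [pv_expand_eq]
    simp only [List.nil_append]
    by_cases hy : ys = []
    · subst hy
      simp [recurcive_pbc_movement_constructor_alt]
    · have hlen : ys.length > 0 := List.length_pos_iff.mpr hy
      rw [if_pos hlen, ih _ hy]
      simp [recurcive_pbc_movement_constructor_alt]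

-- ===== VERDICT (by name: the statement is the Claim_ definition above) =====
theorem recurcive_pbc_movement_constructor_spec : Claim_equal_recurcive_pbc_movement_constructor := by
  intro m L _ hpre
  unfold Spec_recurcive_pbc_movement_constructor
  exact pv_main m L hpre

@[simp] theorem recurcive_pbc_movement_constructor_raises : Claim_raises_recurcive_pbc_movement_constructor := by
  unfold Claim_raises_recurcive_pbc_movement_constructor
  exact ⟨fun m L _ hr hp => hp hr, by decide⟩
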